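-- pv_equiv track=rewrite | github.com/FiniteSingularity/aoc-2021 | 15/script2.py | tile_x
-- ===== SOURCE A (Python) =====
-- def tile_x(risk_nodes, x=5):
--     tiled = []
--     for row in risk_nodes:
--         row_vals = []
--         for loop in range(0, x):
--             row_vals += [1 + ((val - 1 + loop) % 9) for val in row]
--         tiled.append(row_vals)
--     return tiled
-- ===== SOURCE B (Python) =====
-- def _tile_row(row, x):
--     out = []
--     if x > 0:
--         copy = [1 + (v - 1) % 9 for v in row]
--         out += copy
--         for _ in range(x - 1):
--             copy = [v % 9 + 1 for v in copy]
--             out += copy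
--     return out
--
--
-- def tile_x(risk_nodes, x=5):
--     return [_tile_row(row, x) for row in risk_nodes]
-- ===== Notes on version B (the rewrite author's own statement) =====
-- stated objective: alternative
-- what changed: B builds each row as carry-threaded tiles: it normalizes the row once to the first tile and then derives each subsequent tile from the previous one by the 9-to-1 wrap v%9+1, instead of recomputing 1+((v-1+loop)%9) from the original row for every copy.
import Mathlib
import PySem

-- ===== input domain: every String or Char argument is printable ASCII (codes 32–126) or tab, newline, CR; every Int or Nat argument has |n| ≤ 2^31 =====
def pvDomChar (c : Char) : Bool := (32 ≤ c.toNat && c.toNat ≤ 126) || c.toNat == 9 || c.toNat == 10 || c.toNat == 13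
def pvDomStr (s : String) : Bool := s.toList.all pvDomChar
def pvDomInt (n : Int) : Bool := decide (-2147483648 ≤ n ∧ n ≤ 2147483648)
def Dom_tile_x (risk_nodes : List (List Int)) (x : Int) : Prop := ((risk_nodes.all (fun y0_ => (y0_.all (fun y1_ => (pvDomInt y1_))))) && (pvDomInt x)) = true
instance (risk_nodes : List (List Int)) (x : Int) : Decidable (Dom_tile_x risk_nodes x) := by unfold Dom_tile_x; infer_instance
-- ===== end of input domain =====

-- B builds each row by threading the tile forward as carry state (normalize once, then wrap-increment
-- the previous tile x-1 times) instead of recomputing 1+((v-1+loop)%9) from the original row per copy;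
-- objective: alternative decomposition, same cost.

-- ===== PORT A =====
def tile_x (risk_nodes : List (List Int)) (x : Int) : List (List Int) :=
  risk_nodes.foldl (fun tiled row =>
    tiled ++ [(PySem.List.pyRange 0 x 1).foldl (fun row_vals loop =>
      row_vals ++ row.map (fun val => 1 + PySem.Int.mod (val - 1 + loop) 9)) []]) []

-- ===== PORT B =====
def tileRowB (row : List Int) (x : Int) : List Int :=
  if x > 0 then
    let copy := row.map (fun v => 1 + PySem.Int.mod (v - 1) 9)
    ((PySem.List.pyRange 0 (x - 1) 1).foldl
      (fun (st : List Int × List Int) (_ : Int) =>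
        let c := st.2.map (fun v => PySem.Int.mod v 9 + 1)
        (st.1 ++ c, c))
      (copy, copy)).1
  else []

def tile_x_alt (risk_nodes : List (List Int)) (x : Int) : List (List Int) :=
  risk_nodes.map (fun row => tileRowB row x)

-- ===== PRECONDITION & SPEC =====
def Spec_tile_x (risk_nodes : List (List Int)) (x : Int) (out : List (List Int)) : Prop := out = tile_x_alt risk_nodes x
instance (risk_nodes : List (List Int)) (x : Int) (out : List (List Int)) : Decidable (Spec_tile_x risk_nodes x out) := by unfold Spec_tile_x; infer_instance

-- ===== CLAIM (what is proved, stated in full; the proofs are below) =====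
def Claim_equal_tile_x : Prop := ∀ (risk_nodes : List (List Int)) (x : Int), Dom_tile_x risk_nodes x → Spec_tile_x risk_nodes x (tile_x risk_nodes x)

-- ===== LEMMAS AND PROOFS =====

-- one tile (copy number k) of a row, as A computes it
def cp (row : List Int) (k : Int) : List Int :=
  row.map (fun v => 1 + PySem.Int.mod (v - 1 + k) 9)

-- tiles k, k+1, …, k+n-1 concatenated
def cps (row : List Int) (k : Int) : Nat → List Int
  | 0 => []
  | n + 1 => cp row k ++ cps row (k + 1) n

theorem mod_step (v k : Int) :
    PySem.Int.mod (1 + PySem.Int.mod (v - 1 + k) 9) 9 + 1 = 1 + PySem.Int.mod (v - 1 + (k + 1)) 9 := by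
  simp only [PySem.Int.mod_eq_emod_of_pos (by norm_num : (0:Int) < 9)]
  omega

theorem cp_step (row : List Int) (k : Int) :
    (cp row k).map (fun v => PySem.Int.mod v 9 + 1) = cp row (k + 1) := by
  simp only [cp, List.map_map]
  exact List.map_congr_left (fun v _ => mod_step v k)

theorem Afold (row : List Int) : ∀ (n : Nat) (k : Int) (acc : List Int),
    (PySem.List.pyRange k (k + n) 1).foldl (fun row_vals loop =>
      row_vals ++ row.map (fun val => 1 + PySem.Int.mod (val - 1 + loop) 9)) acc
    = acc ++ cps row k n := by
  intro n
  induction n with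
  | zero => intro k acc; simp [cps]
  | succ m ih =>
    intro k acc
    rw [PySem.List.pyRange_one_cons (by push_cast; omega : k < k + ((m + 1 : Nat) : Int))]
    simp only [List.foldl_cons]
    have : k + ((m + 1 : Nat) : Int) = (k + 1) + (m : Nat) := by push_cast; ring
    rw [this, ih (k + 1)]
    simp [cps, cp, List.append_assoc]

theorem Bfold (row : List Int) : ∀ (l : List Int) (k : Int) (acc : List Int),
    (l.foldl (fun (st : List Int × List Int) (_ : Int) =>
        let c := st.2.map (fun v => PySem.Int.mod v 9 + 1)
        (st.1 ++ c, c)) (acc, cp row k))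
    = (acc ++ cps row (k + 1) l.length, cp row (k + l.length)) := by
  intro l
  induction l with
  | nil => intro k acc; simp [cps]
  | cons a t ih =>
    intro k acc
    simp only [List.foldl_cons, cp_step]
    rw [ih (k + 1)]
    simp only [cps, List.length_cons]
    have h2 : k + 1 + (t.length : Int) = k + ((t.length + 1 : Nat) : Int) := by push_cast; ring
    rw [List.append_assoc, h2]

theorem row_eq (row : List Int) (x : Int) :
    (PySem.List.pyRange 0 x 1).foldl (fun row_vals loop =>
      row_vals ++ row.map (fun val => 1 + PySem.Int.mod (val - 1 + loop) 9)) []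
    = tileRowB row x := by
  by_cases hx : x > 0
  · have hx0 : x = 0 + (x.toNat : Int) := by omega
    rw [tileRowB, if_pos hx]
    have hA := Afold row x.toNat 0 []
    rw [← hx0] at hA
    rw [hA]
    have hcopy : row.map (fun v => 1 + PySem.Int.mod (v - 1) 9) = cp row 0 := by
      simp [cp]
    have hlen : (PySem.List.pyRange 0 (x - 1) 1).length = (x - 1).toNat := by
      rw [PySem.List.length_pyRange_one]; omega
    simp only [hcopy]
    rw [Bfold row (PySem.List.pyRange 0 (x - 1) 1) 0 (cp row 0), hlen]
    have hn : x.toNat = (x - 1).toNat + 1 := by omega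
    rw [hn]
    simp [cps]
  · rw [tileRowB, if_neg hx]
    rw [PySem.List.pyRange_one_eq_nil (by omega : x ≤ 0)]
    rfl

theorem tile_foldl (x : Int) : ∀ (rn : List (List Int)) (acc : List (List Int)),
    rn.foldl (fun tiled row =>
      tiled ++ [(PySem.List.pyRange 0 x 1).foldl (fun row_vals loop =>
        row_vals ++ row.map (fun val => 1 + PySem.Int.mod (val - 1 + loop) 9)) []]) acc
    = acc ++ rn.map (fun row => tileRowB row x) := by
  intro rn
  induction rn with
  | nil => intro acc; simp
  | cons r t ih =>
    intro acc
    simp only [List.foldl_cons, List.map_cons]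
    rw [ih, row_eq]
    simp

-- ===== VERDICT (by name: the statement is the Claim_ definition above) =====
theorem tile_x_spec : Claim_equal_tile_x := by
  intro rn x _
  show tile_x rn x = tile_x_alt rn x
  rw [tile_x, tile_x_alt, tile_foldl]
  rfl
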